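-- pv_equiv track=rewrite | github.com/firstep710/Programmers | (level2)영어 끝말잇기.py | solution
-- ===== SOURCE A (Python) =====
-- def solution(n, words):
--     answer = []
--     stack=[]
--     a=0
--     for i in range(len(words)-1):
--         stack.append(words[i])
--         if words[i+1] in stack:
--             a=i+1
--             break
--         elif words[i+1][0]!=stack[-1][-1]:
--             a=i+1
--             break
--     else:
--         answer.append(a)
--         answer.append(a)
--     if len(answer)==0:
--         answer.append((a%n)+1)
--         answer.append((a//n)+1)
--     return answer
-- ===== SOURCE B (Python) =====
-- def solution(n, words):
--     L = len(words)
--     # first index whose word already appeared earlier (sentinel L)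
--     first_dup = L
--     seen = set()
--     for j, w in enumerate(words):
--         if w in seen:
--             first_dup = j
--             break
--         seen.add(w)
--     # first index j>=1 breaking the chain rule; a mismatch at or after the
--     # first duplicate cannot lower the minimum, so scan only below it
--     first_mis = L
--     for j in range(1, first_dup):
--         if words[j][0] != words[j - 1][-1]:
--             first_mis = j
--             break
--     a = min(first_dup, first_mis)
--     if a == L:
--         return [0, 0]
--     return [a % n + 1, a // n + 1]
-- ===== Notes on version B (the rewrite author's own statement) =====
-- stated objective: alternative
-- what changed: Replaces A's single early-break loop with an explicit stack by two independent searches (first duplicate via a set, then first chain mismatch scanned only below that index) merged by taking the minimum against a sentinel.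
import Mathlib
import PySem

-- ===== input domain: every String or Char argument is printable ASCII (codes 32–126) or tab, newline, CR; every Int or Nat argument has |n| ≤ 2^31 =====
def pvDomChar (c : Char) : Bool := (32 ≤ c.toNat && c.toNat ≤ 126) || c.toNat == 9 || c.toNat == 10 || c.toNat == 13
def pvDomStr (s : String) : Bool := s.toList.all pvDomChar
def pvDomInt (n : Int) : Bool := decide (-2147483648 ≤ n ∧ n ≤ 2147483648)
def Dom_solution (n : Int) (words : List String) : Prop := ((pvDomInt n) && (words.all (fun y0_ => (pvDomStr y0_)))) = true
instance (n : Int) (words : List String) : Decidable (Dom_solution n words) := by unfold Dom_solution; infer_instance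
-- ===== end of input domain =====

-- B replaces A's single early-break loop by two independent searches (first duplicate,
-- first chain mismatch) merged by a minimum against a sentinel (objective: alternative).

-- ===== PORT A =====
-- A's loop: stack grows by words[i]; returns some (i+1) at the first break, none on fall-through.
def solutionLoopA : List String → List String → Option Nat
  | stack, w :: next :: rest =>
      let stack' := stack ++ [w]
      if stack'.contains next then some stack'.length
      else if PySem.Str.pyGet? next 0 ≠
              PySem.Str.pyGet? ((PySem.List.pyGet? stack' (-1)).getD "") (-1) then
        some stack'.length
      else solutionLoopA stack' (next :: rest)
  | _, _ => none

def solution (n : Int) (words : List String) : List Int :=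
  match solutionLoopA [] words with
  | none => [0, 0]
  | some a => [PySem.Int.mod (a : Int) n + 1, PySem.Int.floordiv (a : Int) n + 1]

-- ===== PORT B =====
-- first index whose word already appeared (sentinel L)
def firstDupAux (seen : PySem.Set String) : List String → Nat → Nat → Nat
  | [], _, L => L
  | w :: rest, j, L =>
      if PySem.Set.contains seen w then j else firstDupAux (PySem.Set.add seen w) rest (j + 1) L

-- first index j ≥ 1, below the cap c, with words[j][0] ≠ words[j-1][-1] (sentinel L)
def firstMisAux : List String → Nat → Nat → Nat → Nat
  | w :: next :: rest, j, c, L =>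
      if c ≤ j + 1 then L
      else if PySem.Str.pyGet? next 0 ≠ PySem.Str.pyGet? w (-1) then j + 1
      else firstMisAux (next :: rest) (j + 1) c L
  | _, _, _, L => L

def solution_alt (n : Int) (words : List String) : List Int :=
  let L := words.length
  let fd := firstDupAux PySem.Set.empty words 0 L
  let fm := firstMisAux words 0 fd L
  let a := min fd fm
  if a = L then [0, 0]
  else [PySem.Int.mod (a : Int) n + 1, PySem.Int.floordiv (a : Int) n + 1]

-- ===== PRECONDITION & SPEC =====
-- closed-form helpers over the input for Pre_ (j is an index into words)
def dupAt (words : List String) (j : Nat) : Bool := (words.take j).contains (words.getD j "")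
def safeAt (words : List String) (j : Nat) : Bool :=
  words.getD j "" ≠ "" ∧ words.getD (j - 1) "" ≠ ""
def misAt (words : List String) (j : Nat) : Bool :=
  PySem.Str.pyGet? (words.getD j "") 0 ≠ PySem.Str.pyGet? (words.getD (j - 1) "") (-1)
def eventAt (words : List String) (j : Nat) : Bool :=
  dupAt words j || !safeAt words j || misAt words j
def brkAt (words : List String) (j : Nat) : Bool :=
  dupAt words j || (safeAt words j && misAt words j)

-- Pre_ admits exactly the inputs on which A returns: either the scan meets no duplicate,
-- empty word or mismatch at all, or the first such index is a duplicate/mismatch (not an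
-- IndexError on an empty word) and n ≠ 0 (else A's a % n raises ZeroDivisionError).
def Pre_solution (n : Int) (words : List String) : Prop :=
  (∀ j, j < words.length → 1 ≤ j → eventAt words j = false) ∨
  (n ≠ 0 ∧ ∃ j, j < words.length ∧ 1 ≤ j ∧ brkAt words j = true ∧
    ∀ k, k < j → 1 ≤ k → eventAt words k = false)
instance (n : Int) (words : List String) : Decidable (Pre_solution n words) := by
  unfold Pre_solution; infer_instance

def pvWitness_solution : Int × List String := (2, ["ab", "bc", "cd"])

def Spec_solution (n : Int) (words : List String) (out : List Int) : Prop := out = solution_alt n words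
instance (n : Int) (words : List String) (out : List Int) : Decidable (Spec_solution n words out) := by unfold Spec_solution; infer_instance

-- ===== CLAIM (what is proved, stated in full; the proofs are below) =====
def Claim_equal_solution : Prop := ∀ (n : Int) (words : List String), Dom_solution n words → Pre_solution n words → Spec_solution n words (solution n words)

-- ===== LEMMAS AND PROOFS =====

lemma dup_ge : ∀ (l : List String) (seen : PySem.Set String) (j L : Nat),
    j + l.length ≤ L → j ≤ firstDupAux seen l j L := by
  intro l
  induction l with
  | nil => intro seen j L h; simpa [firstDupAux] using by omega
  | cons w rest ih =>
      intro seen j L h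
      simp only [firstDupAux]
      split
      · omega
      · have := ih (PySem.Set.add seen w) (j + 1) L (by simp at h ⊢; omega)
        omega

lemma loop_eq : ∀ (rest stack : List String) (seen : PySem.Set String) (j L : Nat),
    (∀ x, x ∈ seen ↔ x ∈ stack) →
    j = stack.length →
    L = j + rest.length →
    (∀ w, rest.head? = some w → w ∉ stack) →
    solutionLoopA stack rest =
      (if min (firstDupAux seen rest j L) (firstMisAux rest j (firstDupAux seen rest j L) L) = L
       then none
       else some (min (firstDupAux seen rest j L)
                      (firstMisAux rest j (firstDupAux seen rest j L) L))) := by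
  intro rest
  induction rest with
  | nil => intro stack seen j L h1 h2 h3 h4; simp [solutionLoopA, firstDupAux, firstMisAux, h3]
  | cons w rest ih =>
      intro stack seen j L h1 h2 h3 h4
      have hw : w ∉ seen := fun hm => h4 w rfl ((h1 w).mp hm)
      have hmemadd : ∀ x, x ∈ PySem.Set.add seen w ↔ x ∈ stack ++ [w] := by
        intro x; simp [PySem.Set.mem_add, h1 x]
      match rest with
      | [] =>
          have hL : L = j + 1 := by simpa using h3
          simp [solutionLoopA, firstDupAux, firstMisAux, hw, hL]
      | next :: rest' =>
          have hL : L = j + 2 + rest'.length := by simp at h3; omega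
          have hlast : PySem.List.pyGet? (stack ++ [w]) (-1) = some w := by
            simp [PySem.List.pyGet?, PySem.List.pyIdx?]
          simp only [solutionLoopA, hlast, Option.getD_some]
          by_cases c1 : next ∈ stack ++ [w]
          · -- duplicate found at index j+1; the capped mismatch scan stops at once
            have hnx : next ∈ PySem.Set.add seen w := (hmemadd next).mpr c1
            have hnx' : next ∈ seen ∨ next = w := by
              simpa [PySem.Set.mem_add] using hnx
            have hfd : firstDupAux seen (w :: next :: rest') j L = j + 1 := by
              simp [firstDupAux, hw]
              intro ha hb
              rcases hnx' with h | h
              · exact absurd h ha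
              · exact absurd h hb
            have hfm : firstMisAux (w :: next :: rest') j (j + 1) L = L := by
              simp [firstMisAux]
            rw [if_pos (by simpa using c1), hfd, hfm]
            have hmin : min (j + 1) L = j + 1 := Nat.min_eq_left (by omega)
            rw [hmin, if_neg (by omega)]
            simp [h2]
          · have hnx : next ∉ PySem.Set.add seen w := fun hm => c1 ((hmemadd next).mp hm)
            have hfd_step : firstDupAux seen (w :: next :: rest') j L =
                firstDupAux (PySem.Set.add seen w) (next :: rest') (j + 1) L := by
              simp [firstDupAux, hw]
            have hfd_ge : j + 2 ≤ firstDupAux seen (w :: next :: rest') j L := by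
              rw [hfd_step]
              simp only [firstDupAux]
              rw [if_neg (by simpa using hnx)]
              exact dup_ge _ _ _ _ (by omega)
            by_cases c2 : PySem.Str.pyGet? next 0 ≠ PySem.Str.pyGet? w (-1)
            · -- mismatch found at index j+1 (below the cap, since the first dup is ≥ j+2)
              have c2' : PySem.List.pyGet? next.toList 0 ≠ PySem.List.pyGet? w.toList (-1) := by
                simpa [PySem.Str.pyGet?] using c2
              have hfm : firstMisAux (w :: next :: rest') j
                  (firstDupAux seen (w :: next :: rest') j L) L = j + 1 := by
                simp only [firstMisAux]
                rw [if_neg (by omega)]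
                simp
                intro h
                exact absurd h c2'
              rw [if_neg (by simpa using c1), if_pos c2, hfm]
              have hmin : min (firstDupAux seen (w :: next :: rest') j L) (j + 1) = j + 1 :=
                Nat.min_eq_right (by omega)
              rw [hmin, if_neg (by omega)]
              simp [h2]
            · -- no violation here: recurse
              rw [if_neg (by simpa using c1), if_neg c2]
              have hc2 : PySem.List.pyGet? next.toList 0 = PySem.List.pyGet? w.toList (-1) := by
                have := not_not.mp c2
                simpa [PySem.Str.pyGet?] using this
              have step_fm : ∀ c, firstMisAux (w :: next :: rest') j c L =
                  if c ≤ j + 1 then L else firstMisAux (next :: rest') (j + 1) c L := by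
                intro c
                simp [firstMisAux, hc2]
              have hcap : ¬ (firstDupAux (PySem.Set.add seen w) (next :: rest') (j + 1) L ≤ j + 1) := by
                rw [← hfd_step]; omega
              rw [hfd_step, step_fm, if_neg hcap]
              exact ih (stack ++ [w]) (PySem.Set.add seen w) (j + 1) L
                hmemadd
                (by simp [h2])
                (by simp at h3 ⊢; omega)
                (by intro v hv; simp at hv; subst hv; exact c1)

-- ===== VERDICT (by name: the statement is the Claim_ definition above) =====
theorem solution_spec : Claim_equal_solution := by
  intro n words _ _
  unfold Spec_solution solution solution_alt
  rw [loop_eq words [] PySem.Set.empty 0 words.length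
      (by intro x; simp [PySem.Set.empty]) rfl (by simp) (by intro w h; exact List.not_mem_nil)]
  by_cases h : min (firstDupAux ([] : PySem.Set String) words 0 words.length)
      (firstMisAux words 0 (firstDupAux ([] : PySem.Set String) words 0 words.length)
        words.length) = words.length
  · simp [h]
  · simp [h, Nat.cast_min]
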